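-- pv_equiv track=rewrite | github.com/BrenoCPimenta/PokerAI | pokerRNN/data/calculated_information/board_texture.py | getBoardLength
-- ===== SOURCE A (Python) =====
-- def extractCardValue(card):
--     """
--     Turn cards in numeric values
--     """
--     if card == 'A':
--         return 14
--     elif card == 'K':
--         return 13
--     elif card == 'Q':
--         return 12
--     elif card == 'J':
--         return 11
--     elif card == 'T':
--         return 11
--     else:
--         return int(card)
--
-- def getBoardLength(cards):
--     board_length = {}
--     for i, card in enumerate(cards):
--         if i == 0:
--             board_length['flop'] = 0
--             for flopCard in card:
--                 board_length['flop'] += extractCardValue(flopCard)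
--
--         if i == 1:
--             board_length['turn'] = board_length['flop'] +  extractCardValue(card)
--
--         if i == 2:
--             board_length['river'] = board_length['turn'] + extractCardValue(card)
--
--     return board_length
-- ===== SOURCE B (Python) =====
-- FACE_VALUES = {'A': 14, 'K': 13, 'Q': 12, 'J': 11, 'T': 11}
--
--
-- def cardValue(card):
--     return FACE_VALUES[card] if card in FACE_VALUES else int(card)
--
--
-- def getBoardLength(cards):
--     board = cards[:3]
--     if not board:
--         return {}
--     flop = sum(cardValue(ch) for ch in board[0])
--     names = ('flop', 'turn', 'river')
--     return {names[k]: flop + sum(cardValue(c) for c in board[1:k + 1])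
--             for k in range(len(board))}
-- ===== Notes on version B (the rewrite author's own statement) =====
-- stated objective: alternative
-- what changed: Replaces A's enumerate loop with i==0/1/2 dispatch, mutable dict and carry-over of the previous street's value by a face-value lookup table plus a dict comprehension whose entries are computed independently as closed sums (flop char-sum plus the sum of the slice board[1:k+1]), so no state is threaded between streets.
import Mathlib
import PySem

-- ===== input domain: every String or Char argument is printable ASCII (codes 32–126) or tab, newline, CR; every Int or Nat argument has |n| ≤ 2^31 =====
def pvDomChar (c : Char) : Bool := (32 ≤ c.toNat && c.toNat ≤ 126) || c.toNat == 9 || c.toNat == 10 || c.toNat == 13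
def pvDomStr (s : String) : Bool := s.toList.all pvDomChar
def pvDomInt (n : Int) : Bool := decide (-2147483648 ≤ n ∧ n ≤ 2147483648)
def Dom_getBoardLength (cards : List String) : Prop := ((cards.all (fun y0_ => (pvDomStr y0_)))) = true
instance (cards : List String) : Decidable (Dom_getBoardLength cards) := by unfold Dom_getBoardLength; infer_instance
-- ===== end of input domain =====

-- B drops A's enumerate loop with carried-over dict state: a face-value table plus independent
-- per-street closed sums (flop char-sum + sum of a slice) built into a dict comprehension
-- (objective: alternative). Equal on all inputs where A returns (Pre_ below).


-- ===== PORT A =====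
-- int(card) raising ValueError is excluded by Pre_ below; the .getD 0 default is never reached there
def extractCardValue (card : String) : Int :=
  if card = "A" then 14
  else if card = "K" then 13
  else if card = "Q" then 12
  else if card = "J" then 11
  else if card = "T" then 11
  else (PySem.Int.ofStr? card).getD 0

def stepA (d : PySem.Dict String Int) (p : Int × String) : PySem.Dict String Int :=
  let d := if p.1 = 0 then
      p.2.toList.foldl
        (fun d c => PySem.Dict.modify d "flop" 0 (· + extractCardValue (String.ofList [c])))
        (PySem.Dict.insert d "flop" 0)
    else d
  let d := if p.1 = 1 then
      PySem.Dict.insert d "turn" (PySem.Dict.getD d "flop" 0 + extractCardValue p.2)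
    else d
  if p.1 = 2 then
      PySem.Dict.insert d "river" (PySem.Dict.getD d "turn" 0 + extractCardValue p.2)
    else d

def getBoardLength (cards : List String) : List (String × Int) :=
  ((PySem.List.enumerate cards).foldl stepA PySem.Dict.empty).items

-- ===== PORT B =====
def faceValues : PySem.Dict String Int :=
  PySem.Dict.mk [("A", 14), ("K", 13), ("Q", 12), ("J", 11), ("T", 11)]

-- int(card) raising ValueError is excluded by Pre_ below; the .getD 0 default is never reached there
def cardValue (card : String) : Int :=
  match PySem.Dict.get? faceValues card with
  | some v => v
  | none => (PySem.Int.ofStr? card).getD 0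

def getBoardLength_alt (cards : List String) : List (String × Int) :=
  let board := PySem.List.slice cards none (some 3)
  match board with
  | [] => []
  | h :: t =>
    let flop := (h.toList.map (fun c => cardValue (String.ofList [c]))).sum
    let names : List String := ["flop", "turn", "river"]
    (PySem.Dict.ofList ((PySem.List.pyRange 0 ((h :: t).length : Int) 1).map (fun k =>
        ((PySem.List.pyGet? names k).getD "",
         flop + ((PySem.List.slice (h :: t) (some 1) (some (k + 1))).map cardValue).sum)))).items

-- ===== PRECONDITION & SPEC =====
-- Pre_ excludes exactly the inputs on which Python A raises ValueError: a flop character or a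
-- turn/river card string that is neither a face-card letter nor accepted by int().
def okCard (s : String) : Bool :=
  s == "A" || s == "K" || s == "Q" || s == "J" || s == "T" || (PySem.Int.ofStr? s).isSome

def Pre_getBoardLength (cards : List String) : Prop :=
  ((cards.headD "").toList.all (fun c => okCard (String.ofList [c]))
    && ((cards.drop 1).take 2).all okCard) = true

instance (cards : List String) : Decidable (Pre_getBoardLength cards) := by
  unfold Pre_getBoardLength; infer_instance

def pvWitness_getBoardLength : List String := ["AK3", "7", "T"]

def Spec_getBoardLength (cards : List String) (out : List (String × Int)) : Prop := out = getBoardLength_alt cards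
instance (cards : List String) (out : List (String × Int)) : Decidable (Spec_getBoardLength cards out) := by unfold Spec_getBoardLength; infer_instance

-- ===== CLAIM (what is proved, stated in full; the proofs are below) =====
def Claim_equal_getBoardLength : Prop := ∀ (cards : List String), Dom_getBoardLength cards → Pre_getBoardLength cards → Spec_getBoardLength cards (getBoardLength cards)

-- ===== LEMMAS AND PROOFS =====

-- B's table lookup agrees with A's if-chain on every string
lemma cardValue_eq (s : String) : cardValue s = extractCardValue s := by
  unfold cardValue faceValues extractCardValue
  by_cases hA : s = "A"
  · simp [hA, PySem.Dict.get?_mk_cons]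
  by_cases hK : s = "K"
  · simp [hK, PySem.Dict.get?_mk_cons]
  by_cases hQ : s = "Q"
  · simp [hQ, PySem.Dict.get?_mk_cons]
  by_cases hJ : s = "J"
  · simp [hJ, PySem.Dict.get?_mk_cons]
  by_cases hT : s = "T"
  · simp [hT, PySem.Dict.get?_mk_cons]
  · simp [hA, hK, hQ, hJ, hT, PySem.Dict.get?, Ne.symm hA, Ne.symm hK, Ne.symm hQ, Ne.symm hJ,
      Ne.symm hT]

-- indices ≥ 3 perform no dict operation in A's loop
lemma foldl_stepA_ge3 (l : List String) (k : Int) (hk : 3 ≤ k) (d : PySem.Dict String Int) :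
    (PySem.List.enumerate l k).foldl stepA d = d := by
  induction l generalizing k d with
  | nil => simp [PySem.List.enumerate_nil]
  | cons x xs ih =>
    rw [PySem.List.enumerate_cons, List.foldl_cons]
    have h0 : ¬ k = 0 := by omega
    have h1 : ¬ k = 1 := by omega
    have h2 : ¬ k = 2 := by omega
    rw [show stepA d (k, x) = d by simp [stepA, h0, h1, h2]]
    exact ih (k + 1) (by omega) d

-- A's inner flop loop on the singleton dict {"flop": v}
lemma flopFold (cs : List Char) (v : Int) :
    cs.foldl (fun d c => PySem.Dict.modify d "flop" 0 (· + extractCardValue (String.ofList [c])))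
      (PySem.Dict.mk [("flop", v)])
    = PySem.Dict.mk [("flop", v + (cs.map (fun c => extractCardValue (String.ofList [c]))).sum)] := by
  induction cs generalizing v with
  | nil => simp
  | cons c cs ih =>
    rw [List.foldl_cons]
    rw [show PySem.Dict.modify (PySem.Dict.mk [("flop", v)]) "flop" 0
          (· + extractCardValue (String.ofList [c]))
        = PySem.Dict.mk [("flop", v + extractCardValue (String.ofList [c]))] from rfl]
    rw [ih]
    simp [add_assoc]

lemma stepA_zero (d : PySem.Dict String Int) (s : String) :
    stepA d (0, s) =
      s.toList.foldl
        (fun d c => PySem.Dict.modify d "flop" 0 (· + extractCardValue (String.ofList [c])))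
        (PySem.Dict.insert d "flop" 0) := by
  simp [stepA]

-- ===== VERDICT (by name: the statement is the Claim_ definition above) =====
theorem getBoardLength_spec : Claim_equal_getBoardLength := by
  intro cards _ _
  unfold Spec_getBoardLength
  match cards with
  | [] => rfl
  | [a] =>
    show ((PySem.List.enumerate [a] 0).foldl stepA PySem.Dict.empty).items = _
    rw [PySem.List.enumerate_cons, PySem.List.enumerate_nil, List.foldl_cons, List.foldl_nil,
      stepA_zero]
    rw [show PySem.Dict.insert (PySem.Dict.empty : PySem.Dict String Int) "flop" 0
          = PySem.Dict.mk [("flop", 0)] from rfl]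
    rw [flopFold]
    have hr : PySem.List.pyRange 0 1 1 = [0] := by decide
    simp [getBoardLength_alt, hr, PySem.List.slice, PySem.List.clampIdx, PySem.List.pyGet?, PySem.List.pyIdx?, cardValue_eq,
      PySem.Dict.ofList, PySem.Dict.update, PySem.Dict.insert,
      PySem.Dict.contains, PySem.Dict.empty, List.any]
  | [a, b] =>
    show ((PySem.List.enumerate [a, b] 0).foldl stepA PySem.Dict.empty).items = _
    rw [PySem.List.enumerate_cons, PySem.List.enumerate_cons, PySem.List.enumerate_nil,
      List.foldl_cons, List.foldl_cons, List.foldl_nil, stepA_zero]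
    rw [show PySem.Dict.insert (PySem.Dict.empty : PySem.Dict String Int) "flop" 0
          = PySem.Dict.mk [("flop", 0)] from rfl]
    rw [flopFold]
    have hr : PySem.List.pyRange 0 2 1 = [0, 1] := by decide
    simp [stepA, getBoardLength_alt, hr, PySem.List.slice, PySem.List.clampIdx, PySem.List.pyGet?, PySem.List.pyIdx?, cardValue_eq,
      PySem.Dict.ofList, PySem.Dict.update, PySem.Dict.insert, PySem.Dict.getD, PySem.Dict.get?,
      PySem.Dict.contains, PySem.Dict.empty, List.any]
  | a :: b :: c :: rest =>
    show ((PySem.List.enumerate (a :: b :: c :: rest) 0).foldl stepA PySem.Dict.empty).items = _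
    rw [PySem.List.enumerate_cons, PySem.List.enumerate_cons, PySem.List.enumerate_cons,
      List.foldl_cons, List.foldl_cons, List.foldl_cons,
      foldl_stepA_ge3 rest (0+1+1+1) (by norm_num), stepA_zero]
    rw [show PySem.Dict.insert (PySem.Dict.empty : PySem.Dict String Int) "flop" 0
          = PySem.Dict.mk [("flop", 0)] from rfl]
    rw [flopFold]
    have hr : PySem.List.pyRange 0 3 1 = [0, 1, 2] := by decide
    simp [stepA, getBoardLength_alt, hr, PySem.List.slice, PySem.List.clampIdx, PySem.List.pyGet?, PySem.List.pyIdx?, cardValue_eq,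
      PySem.Dict.ofList, PySem.Dict.update, PySem.Dict.insert, PySem.Dict.getD, PySem.Dict.get?,
      PySem.Dict.contains, PySem.Dict.empty, List.any, add_assoc]
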